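-- pv_equiv track=rewrite | github.com/MaheshSMA/Institute-Management | aibackend/main.py | find_relevant_pages
-- ===== SOURCE A (Python) =====
-- def find_relevant_pages(question, docs, max_pages=5):
--     keywords = question.lower().split()
--
--     scored = []
--     for d in docs:
--         score = sum(1 for k in keywords if k in d["text"].lower())
--         if score > 0:
--             scored.append((score, d))
--
--     scored.sort(reverse=True, key=lambda x: x[0])
--     return [d for _, d in scored[:max_pages]]
-- ===== SOURCE B (Python) =====
-- def find_relevant_pages(question, docs, max_pages=5):
--     keywords = question.lower().split()
--
--     # score every doc in one comprehension (0 allowed)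
--     pairs = [(len([k for k in keywords if k in d["text"].lower()]), d)
--              for d in docs]
--
--     # counting/bucket selection instead of a comparison sort: walk the possible
--     # scores len(keywords)..1 high-to-low, emitting each bucket in original
--     # order (stable); score-0 docs are never reached.
--     out = []
--     for s in range(len(keywords), 0, -1):
--         out.extend(d for sc, d in pairs if sc == s)
--     return out[:max_pages]
-- ===== Notes on version B (the rewrite author's own statement) =====
-- stated objective: alternative
-- what changed: B scores every doc via a comprehension (keeping zero scores) and replaces A's filtered accumulation plus full descending comparison sort by a counting/bucket selection: it walks the possible scores len(keywords)..1 from high to low and extends the output with each score's bucket in original order, then slices; no sort and no score>0 accumulator loop.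
import Mathlib
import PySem

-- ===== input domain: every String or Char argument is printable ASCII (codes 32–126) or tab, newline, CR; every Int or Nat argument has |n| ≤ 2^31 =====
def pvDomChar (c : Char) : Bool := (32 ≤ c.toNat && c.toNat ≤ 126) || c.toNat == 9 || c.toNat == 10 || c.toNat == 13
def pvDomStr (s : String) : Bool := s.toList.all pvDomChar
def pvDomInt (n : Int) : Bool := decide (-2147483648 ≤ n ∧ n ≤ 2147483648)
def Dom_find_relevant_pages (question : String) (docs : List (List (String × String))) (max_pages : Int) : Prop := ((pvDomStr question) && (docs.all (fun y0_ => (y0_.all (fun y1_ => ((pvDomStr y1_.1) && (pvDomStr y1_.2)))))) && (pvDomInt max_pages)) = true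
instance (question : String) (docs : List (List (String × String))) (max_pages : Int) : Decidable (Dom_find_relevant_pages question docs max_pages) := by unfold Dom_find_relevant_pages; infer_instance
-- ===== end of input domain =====

-- B scores every doc (zero scores kept) by a comprehension and replaces A's
-- filtered accumulation + full descending sort by a counting/bucket selection
-- over scores len(keywords)..1 (stable); same output (objective: alternative).

-- ===== PORT A =====
def find_relevant_pages (question : String) (docs : List (List (String × String))) (max_pages : Int) : List (List (String × String)) :=
  let keywords := PySem.Str.split₀ (PySem.Str.lower question)
  let scored : List (Int × List (String × String)) :=
    docs.foldl (fun scored d =>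
      let score : Int := keywords.foldl (fun acc k =>
        if PySem.Str.isIn k (PySem.Str.lower ((PySem.Dict.get? (PySem.Dict.mk d) "text").getD "")) then acc + 1 else acc) 0
      if score > 0 then scored ++ [(score, d)] else scored) []
  let sortedScored := PySem.List.sorted scored (fun x => x.1) true
  (PySem.List.slice sortedScored none (some max_pages)).map (fun x => x.2)

-- ===== PORT B =====
def find_relevant_pages_alt (question : String) (docs : List (List (String × String))) (max_pages : Int) : List (List (String × String)) :=
  let keywords := PySem.Str.split₀ (PySem.Str.lower question)
  let pairs : List (Int × List (String × String)) :=
    docs.map (fun d =>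
      (((keywords.filter (fun k =>
          PySem.Str.isIn k (PySem.Str.lower ((PySem.Dict.get? (PySem.Dict.mk d) "text").getD "")))).length : Int), d))
  let out : List (List (String × String)) :=
    (PySem.List.pyRange (keywords.length : Int) 0 (-1)).foldl (fun out s =>
      out ++ (pairs.filter (fun p => p.1 == s)).map (fun p => p.2)) []
  PySem.List.slice out none (some max_pages)

-- ===== PRECONDITION & SPEC =====
-- Pre_ excludes exactly the inputs where Python A raises KeyError: some doc lacks a
-- "text" key while the question yields at least one keyword (B raises there too).
def Pre_find_relevant_pages (question : String) (docs : List (List (String × String))) (max_pages : Int) : Prop :=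
  PySem.Str.split₀ (PySem.Str.lower question) = [] ∨
  (docs.all (fun d => (PySem.Dict.get? (PySem.Dict.mk d) "text").isSome)) = true
instance (question : String) (docs : List (List (String × String))) (max_pages : Int) : Decidable (Pre_find_relevant_pages question docs max_pages) := by unfold Pre_find_relevant_pages; infer_instance
def pvWitness_find_relevant_pages : String × (List (List (String × String))) × Int :=
  ("ab cd", [[("text", "xx ab"), ("id", "1")], [("text", "AB cd")]], 1)

def Spec_find_relevant_pages (question : String) (docs : List (List (String × String))) (max_pages : Int) (out : List (List (String × String))) : Prop := out = find_relevant_pages_alt question docs max_pages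
instance (question : String) (docs : List (List (String × String))) (max_pages : Int) (out : List (List (String × String))) : Decidable (Spec_find_relevant_pages question docs max_pages out) := by unfold Spec_find_relevant_pages; infer_instance

-- ===== CLAIM =====
def Claim_equal_find_relevant_pages : Prop := ∀ (question : String) (docs : List (List (String × String))) (max_pages : Int), Dom_find_relevant_pages question docs max_pages → Pre_find_relevant_pages question docs max_pages → Spec_find_relevant_pages question docs max_pages (find_relevant_pages question docs max_pages)

-- ===== LEMMAS AND PROOFS =====

-- slice commutes with map (clampIdx only looks at the length, which map preserves)
theorem pv_slice_map {α β : Type} (f : α → β) (xs : List α) (a? b? : Option Int) :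
    PySem.List.slice (xs.map f) a? b? = (PySem.List.slice xs a? b?).map f := by
  simp [PySem.List.slice, List.map_take, List.map_drop]

-- A's counting foldl computes the length of the filtered keyword list
theorem pv_count_eq_filter_len {σ : Type} (kws : List σ) (c : σ → Bool) (acc : Int) :
    kws.foldl (fun acc k => if c k then acc + 1 else acc) acc
      = acc + ((kws.filter c).length : Int) := by
  induction kws generalizing acc with
  | nil => simp
  | cons k kws ih =>
    simp only [List.foldl_cons, List.filter_cons]
    by_cases h : c k = true
    · rw [if_pos h, if_pos h, ih]; push_cast [List.length_cons]; ring
    · rw [if_neg h, if_neg h, ih]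

-- A's conditional accumulation over docs is the positive-score filter of B's pairs
theorem pv_foldl_scored {α : Type} (f : α → Int) (docs : List α) (acc : List (Int × α)) :
    docs.foldl (fun sc d => if f d > 0 then sc ++ [(f d, d)] else sc) acc
      = acc ++ (docs.map (fun d => (f d, d))).filter (fun p => 0 < p.1) := by
  induction docs generalizing acc with
  | nil => simp
  | cons d docs ih =>
    by_cases h : 0 < f d
    · simp [List.foldl_cons, h, ih]
    · simp [List.foldl_cons, h, ih]

-- insertBy inserts in the middle: after everything not-before, before the head of the rest
theorem pv_insertBy_mid {α : Type} (before : α → α → Bool) (x : α) (l1 l2 : List α)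
    (h1 : ∀ y ∈ l1, before x y = false)
    (h2 : ∀ hd, l2.head? = some hd → before x hd = true) :
    PySem.List.insertBy before x (l1 ++ l2) = l1 ++ x :: l2 := by
  induction l1 with
  | nil =>
    cases l2 with
    | nil => simp [PySem.List.insertBy]
    | cons hd t => simp [PySem.List.insertBy, h2 hd rfl]
  | cons a l1 ih =>
    have ha : before x a = false := h1 a (List.mem_cons_self)
    simp only [List.cons_append, PySem.List.insertBy, ha, Bool.false_eq_true, if_false]
    rw [ih (fun y hy => h1 y (List.mem_cons_of_mem a hy))]

theorem pv_mem_bkt {α : Type} {xs : List (Int × α)} {s : Int} {y : Int × α}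
    (hy : y ∈ xs.filter (fun p => p.1 == s)) : y.1 = s := by
  have := (List.mem_filter.mp hy).2
  simpa using this

-- KEY LEMMA: the stable descending sort by score equals the concatenation of
-- the score-buckets taken in strictly decreasing score order.
theorem pv_sortedRev_eq_flatMap_filter {α : Type} (ds : List Int)
    (hds : ds.Pairwise (fun a b => b < a)) (xs : List (Int × α))
    (hx : ∀ p ∈ xs, p.1 ∈ ds) :
    PySem.List.sorted xs (fun p => p.1) true = ds.flatMap (fun s => xs.filter (fun p => p.1 == s)) := by
  induction xs using List.reverseRecOn with
  | nil => simp [PySem.List.sorted]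
  | append_singleton xs p ih =>
    have hxs : ∀ q ∈ xs, q.1 ∈ ds := fun q hq => hx q (List.mem_append_left _ hq)
    have hp : p.1 ∈ ds := hx p (List.mem_append_right _ (List.mem_singleton.mpr rfl))
    obtain ⟨d1, d2, rfl⟩ := List.append_of_mem hp
    have hpw := List.pairwise_append.mp hds
    have hd1 : ∀ s ∈ d1, p.1 < s := fun s hs => hpw.2.2 s hs p.1 (List.mem_cons_self)
    have hd2 : ∀ s ∈ d2, s < p.1 := fun s hs => (List.pairwise_cons.mp hpw.2.1).1 s hs
    have hL : PySem.List.sorted (xs ++ [p]) (fun p => p.1) true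
        = PySem.List.insertBy (fun a b => decide (b.1 < a.1)) p
            (PySem.List.sorted xs (fun p => p.1) true) := by
      rw [PySem.List.sorted_rev_eq_foldl_insertBy, PySem.List.sorted_rev_eq_foldl_insertBy,
        List.foldl_append]
      simp
    rw [hL, ih hxs]
    rw [List.flatMap_append, List.flatMap_cons]
    rw [show (d1.flatMap (fun s => xs.filter (fun p => p.1 == s))
          ++ (xs.filter (fun q => q.1 == p.1)
          ++ d2.flatMap (fun s => xs.filter (fun p => p.1 == s))))
        = (d1.flatMap (fun s => xs.filter (fun p => p.1 == s))
          ++ xs.filter (fun q => q.1 == p.1))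
          ++ d2.flatMap (fun s => xs.filter (fun p => p.1 == s)) from by
      simp [List.append_assoc]]
    rw [pv_insertBy_mid]
    · rw [List.flatMap_append, List.flatMap_cons]
      have e1 : d1.flatMap (fun s => (xs ++ [p]).filter (fun q => q.1 == s))
          = d1.flatMap (fun s => xs.filter (fun q => q.1 == s)) := by
        refine List.flatMap_congr ?_
        intro s hs
        rw [List.filter_append]
        have : p.1 ≠ s := ne_of_lt (hd1 s hs)
        simp [beq_iff_eq, this]
      have e2 : d2.flatMap (fun s => (xs ++ [p]).filter (fun q => q.1 == s))
          = d2.flatMap (fun s => xs.filter (fun q => q.1 == s)) := by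
        refine List.flatMap_congr ?_
        intro s hs
        rw [List.filter_append]
        have : p.1 ≠ s := ne_of_gt (hd2 s hs)
        simp [beq_iff_eq, this]
      have e3 : (xs ++ [p]).filter (fun q => q.1 == p.1)
          = xs.filter (fun q => q.1 == p.1) ++ [p] := by
        rw [List.filter_append]
        simp
      rw [e1, e2, e3]
      simp [List.append_assoc]
    · intro y hy
      rcases List.mem_append.mp hy with hy1 | hy2
      · obtain ⟨s, hs, hys⟩ := List.mem_flatMap.mp hy1
        have := pv_mem_bkt hys
        have := hd1 s hs
        simp only [decide_eq_false_iff_not]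
        omega
      · have := pv_mem_bkt hy2
        simp only [decide_eq_false_iff_not]
        omega
    · intro hd hhd
      have hmem : hd ∈ d2.flatMap (fun s => xs.filter (fun p => p.1 == s)) :=
        List.mem_of_mem_head? hhd
      obtain ⟨s, hs, hys⟩ := List.mem_flatMap.mp hmem
      have := pv_mem_bkt hys
      have := hd2 s hs
      simp only [decide_eq_true_eq]
      omega

-- inside a positive bucket, filtering the positive-score pairs = filtering all pairs
theorem pv_bucket_pos {α : Type} (pairs : List (Int × α)) (s : Int) (hs : 0 < s) :
    (pairs.filter (fun p => 0 < p.1)).filter (fun p => p.1 == s)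
      = pairs.filter (fun p => p.1 == s) := by
  induction pairs with
  | nil => rfl
  | cons p pairs ih =>
    by_cases h : p.1 = s
    · simp [h, hs, ih]
    · by_cases h0 : 0 < p.1 <;> simp [h, h0, ih]

-- the whole pipeline, with the keyword list and the per-doc text abstracted out
theorem pv_main {α : Type} (kw : List String) (t : α → String) (docs : List α) (mp : Int) :
    (PySem.List.slice
        (PySem.List.sorted
          (docs.foldl (fun sc d =>
            let s : Int := kw.foldl (fun acc k => if PySem.Str.isIn k (t d) then acc + 1 else acc) 0
            if s > 0 then sc ++ [(s, d)] else sc) [])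
          (fun x => x.1) true)
        none (some mp)).map (fun x => x.2)
    = PySem.List.slice
        ((PySem.List.pyRange (kw.length : Int) 0 (-1)).foldl (fun o s =>
          o ++ (((docs.map (fun d => (((kw.filter (fun k => PySem.Str.isIn k (t d))).length : Int), d))).filter
                  (fun p => p.1 == s)).map (fun p => p.2))) [])
        none (some mp) := by
  have hcnt : ∀ d : α,
      kw.foldl (fun acc k => if PySem.Str.isIn k (t d) then acc + 1 else acc) 0
        = ((kw.filter (fun k => PySem.Str.isIn k (t d))).length : Int) := by
    intro d; rw [pv_count_eq_filter_len]; simp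
  have hsc : docs.foldl (fun sc d =>
        let s : Int := kw.foldl (fun acc k => if PySem.Str.isIn k (t d) then acc + 1 else acc) 0
        if s > 0 then sc ++ [(s, d)] else sc) []
      = (docs.map (fun d => (((kw.filter (fun k => PySem.Str.isIn k (t d))).length : Int), d))).filter
          (fun p => 0 < p.1) := by
    simp only [hcnt]
    rw [pv_foldl_scored (fun d => ((kw.filter (fun k => PySem.Str.isIn k (t d))).length : Int)) docs []]
    simp
  rw [hsc]
  rw [PySem.List.foldl_append_eq_flatMap, List.nil_append]
  have hbnd : ∀ p ∈ (docs.map (fun d => (((kw.filter (fun k => PySem.Str.isIn k (t d))).length : Int), d))).filter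
        (fun p => 0 < p.1),
      p.1 ∈ PySem.List.pyRange (kw.length : Int) 0 (-1) := by
    intro p hp
    have h1 := List.mem_filter.mp hp
    obtain ⟨d, _, rfl⟩ := List.mem_map.mp h1.1
    rw [PySem.List.mem_pyRange_neg_one]
    constructor
    · simpa using h1.2
    · dsimp only
      exact_mod_cast List.length_filter_le _ _
  rw [pv_sortedRev_eq_flatMap_filter (PySem.List.pyRange (kw.length : Int) 0 (-1))
    (by rw [PySem.List.pyRange_neg_one_eq_reverse]
        exact List.pairwise_reverse.mpr (PySem.List.pairwise_lt_pyRange_one _ _))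
    _ hbnd]
  have hbk : (PySem.List.pyRange (kw.length : Int) 0 (-1)).flatMap (fun s =>
        ((docs.map (fun d => (((kw.filter (fun k => PySem.Str.isIn k (t d))).length : Int), d))).filter
          (fun p => 0 < p.1)).filter (fun p => p.1 == s))
      = (PySem.List.pyRange (kw.length : Int) 0 (-1)).flatMap (fun s =>
        (docs.map (fun d => (((kw.filter (fun k => PySem.Str.isIn k (t d))).length : Int), d))).filter
          (fun p => p.1 == s)) :=
    List.flatMap_congr (fun s hs => pv_bucket_pos _ s (PySem.List.mem_pyRange_neg_one.mp hs).1)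
  rw [hbk, ← pv_slice_map, List.map_flatMap]

-- ===== VERDICT =====
theorem find_relevant_pages_spec : Claim_equal_find_relevant_pages := by
  intro question docs max_pages _hdom _hpre
  unfold Spec_find_relevant_pages find_relevant_pages find_relevant_pages_alt
  exact pv_main (PySem.Str.split₀ (PySem.Str.lower question))
    (fun d => PySem.Str.lower ((PySem.Dict.get? (PySem.Dict.mk d) "text").getD "")) docs max_pages
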